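-- pv_equiv track=rewrite | github.com/sinanislekdemir/payton | payton/scene/geometry/ragdoll.py | _classify_bone_type
-- ===== SOURCE A (Python) =====
-- def _classify_bone_type(parent_name: str, child_name: str) -> str:
--     """Classify bone type based on joint names for realistic tapering."""
--     # Convert to lowercase for easier matching
--     parent_lower = parent_name.lower()
--     child_lower = child_name.lower()
--
--     # Major limb bones (thick)
--     if any(bone in parent_lower for bone in ['shoulder', 'hip', 'spine']):
--         return 'major'
--     if any(bone in child_lower for bone in ['shoulder', 'hip', 'spine']):
--         return 'major'
--
--     # Arm bones
--     if 'arm' in parent_lower or 'arm' in child_lower: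
--         if 'forearm' in parent_lower or 'forearm' in child_lower:
--             return 'forearm'  # Tapered (thick at elbow, thin at wrist)
--         else:
--             return 'upperarm'  # Reverse taper (thick at shoulder, thin at elbow)
--
--     # Leg bones
--     if 'leg' in parent_lower or 'leg' in child_lower:
--         if 'upleg' in parent_lower or 'upleg' in child_lower:
--             return 'upperleg'  # Thick at hip, thinner at knee
--         else:
--             return 'lowerleg'  # Thick at knee, thinner at ankle
--
--     # Hand/finger bones (small and thin)
--     if any(part in parent_lower or part in child_lower
--            for part in ['hand', 'finger', 'thumb']):
--         return 'finger'
--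
--     # Foot bones
--     if any(part in parent_lower or part in child_lower
--            for part in ['foot', 'toe']):
--         return 'foot'
--
--     # Default to regular bone
--     return 'regular'
-- ===== SOURCE B (Python) =====
-- _BONE_RULES = [
--     (['shoulder', 'hip', 'spine'], 'major'),
--     (['forearm'], 'forearm'),
--     (['arm'], 'upperarm'),
--     (['upleg'], 'upperleg'),
--     (['leg'], 'lowerleg'),
--     (['hand', 'finger', 'thumb'], 'finger'),
--     (['foot', 'toe'], 'foot'),
-- ]
--
--
-- def _classify_bone_type(parent_name: str, child_name: str) -> str:
--     """Classify bone type: first matching rule in an ordered keyword table."""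
--     parent_lower = parent_name.lower()
--     child_lower = child_name.lower()
--     for keywords, label in _BONE_RULES:
--         if any(kw in parent_lower or kw in child_lower for kw in keywords):
--             return label
--     return 'regular'
-- ===== Notes on version B (the rewrite author's own statement) =====
-- stated objective: simpler
-- what changed: A's hand-written chain of if/elif branches with per-group any() calls is replaced by a single ordered keyword-to-label rule table scanned for the first rule with a matching keyword ('forearm' before 'arm', 'upleg' before 'leg' preserve A's nested-branch tie-breaking).
import Mathlib
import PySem

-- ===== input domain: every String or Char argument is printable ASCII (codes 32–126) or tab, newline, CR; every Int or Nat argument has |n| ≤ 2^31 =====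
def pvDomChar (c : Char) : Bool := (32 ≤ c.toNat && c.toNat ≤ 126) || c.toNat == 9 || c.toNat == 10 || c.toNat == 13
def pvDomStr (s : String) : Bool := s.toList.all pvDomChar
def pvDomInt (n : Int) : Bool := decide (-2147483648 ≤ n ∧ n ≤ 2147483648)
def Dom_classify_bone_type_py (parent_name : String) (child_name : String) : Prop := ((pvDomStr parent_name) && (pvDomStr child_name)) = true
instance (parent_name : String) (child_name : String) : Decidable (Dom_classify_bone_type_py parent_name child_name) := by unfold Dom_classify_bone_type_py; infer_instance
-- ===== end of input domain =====

-- B replaces A's hand-written if/else chain by an ordered keyword→label rule table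
-- scanned for the first match (objective: simpler); same return value everywhere.

-- ===== PORT A =====
-- literal transliteration of A's branch chain
def classify_bone_type_py (parent_name : String) (child_name : String) : String :=
  let parent_lower := PySem.Str.lower parent_name
  let child_lower := PySem.Str.lower child_name
  if ["shoulder", "hip", "spine"].any (fun bone => PySem.Str.isIn bone parent_lower) then "major"
  else if ["shoulder", "hip", "spine"].any (fun bone => PySem.Str.isIn bone child_lower) then "major"
  else if PySem.Str.isIn "arm" parent_lower || PySem.Str.isIn "arm" child_lower then
    if PySem.Str.isIn "forearm" parent_lower || PySem.Str.isIn "forearm" child_lower then "forearm"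
    else "upperarm"
  else if PySem.Str.isIn "leg" parent_lower || PySem.Str.isIn "leg" child_lower then
    if PySem.Str.isIn "upleg" parent_lower || PySem.Str.isIn "upleg" child_lower then "upperleg"
    else "lowerleg"
  else if ["hand", "finger", "thumb"].any
      (fun part => PySem.Str.isIn part parent_lower || PySem.Str.isIn part child_lower) then "finger"
  else if ["foot", "toe"].any
      (fun part => PySem.Str.isIn part parent_lower || PySem.Str.isIn part child_lower) then "foot"
  else "regular"

-- ===== PORT B =====
def boneRules : List (List String × String) :=
  [(["shoulder", "hip", "spine"], "major"),
   (["forearm"], "forearm"),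
   (["arm"], "upperarm"),
   (["upleg"], "upperleg"),
   (["leg"], "lowerleg"),
   (["hand", "finger", "thumb"], "finger"),
   (["foot", "toe"], "foot")]

-- literal transliteration of B: first matching rule of the ordered table
def classify_bone_type_py_alt (parent_name : String) (child_name : String) : String :=
  let parent_lower := PySem.Str.lower parent_name
  let child_lower := PySem.Str.lower child_name
  match boneRules.find? (fun rule =>
      rule.1.any (fun kw => PySem.Str.isIn kw parent_lower || PySem.Str.isIn kw child_lower)) with
  | some rule => rule.2
  | none => "regular"

-- ===== PRECONDITION & SPEC =====
def Spec_classify_bone_type_py (parent_name : String) (child_name : String) (out : String) : Prop := out = classify_bone_type_py_alt parent_name child_name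
instance (parent_name : String) (child_name : String) (out : String) : Decidable (Spec_classify_bone_type_py parent_name child_name out) := by unfold Spec_classify_bone_type_py; infer_instance

-- ===== CLAIM (what is proved, stated in full; the proofs are below) =====
def Claim_equal_classify_bone_type_py : Prop := ∀ (parent_name : String) (child_name : String), Dom_classify_bone_type_py parent_name child_name → Spec_classify_bone_type_py parent_name child_name (classify_bone_type_py parent_name child_name)

-- ===== LEMMAS AND PROOFS =====

-- a substring of a substring is a substring: if "arm" is not in l, "forearm" is not either
theorem charsIsIn_false_of_infix {sub1 sub2 : List Char} (hsub : sub1 <:+: sub2)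
    {l : List Char} (h : PySem.Chars.isIn sub1 l = false) : PySem.Chars.isIn sub2 l = false := by
  rw [← Bool.not_eq_true] at h ⊢
  intro h2
  exact h ((PySem.Chars.isIn_iff_infix _ _).2 (hsub.trans ((PySem.Chars.isIn_iff_infix _ _).1 h2)))

theorem no_forearm {l : List Char} (h : PySem.Chars.isIn ['a', 'r', 'm'] l = false) :
    PySem.Chars.isIn ['f', 'o', 'r', 'e', 'a', 'r', 'm'] l = false :=
  charsIsIn_false_of_infix (by decide) h

theorem no_upleg {l : List Char} (h : PySem.Chars.isIn ['l', 'e', 'g'] l = false) :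
    PySem.Chars.isIn ['u', 'p', 'l', 'e', 'g'] l = false :=
  charsIsIn_false_of_infix (by decide) h

-- ===== VERDICT (by name: the statement is the Claim_ definition above) =====
theorem classify_bone_type_py_spec : Claim_equal_classify_bone_type_py := by
  intro parent_name child_name _
  unfold Spec_classify_bone_type_py classify_bone_type_py classify_bone_type_py_alt boneRules
  set pl := PySem.Str.lower parent_name with hpl
  set cl := PySem.Str.lower child_name with hcl
  simp only [List.find?, List.any_cons, List.any_nil]
  simp
  cases h1 : PySem.Chars.isIn ['s', 'h', 'o', 'u', 'l', 'd', 'e', 'r'] pl.toList with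
  | true => simp
  | false =>
  cases h2 : PySem.Chars.isIn ['s', 'h', 'o', 'u', 'l', 'd', 'e', 'r'] cl.toList with
  | true => simp
  | false =>
  cases h3 : PySem.Chars.isIn ['h', 'i', 'p'] pl.toList with
  | true => simp
  | false =>
  cases h4 : PySem.Chars.isIn ['h', 'i', 'p'] cl.toList with
  | true => simp
  | false =>
  cases h5 : PySem.Chars.isIn ['s', 'p', 'i', 'n', 'e'] pl.toList with
  | true => simp
  | false =>
  cases h6 : PySem.Chars.isIn ['s', 'p', 'i', 'n', 'e'] cl.toList with
  | true => simp
  | false =>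
  simp only [Bool.false_eq_true, or_false, if_false]
  cases ha1 : PySem.Chars.isIn ['a', 'r', 'm'] pl.toList with
  | true => cases hf1 : PySem.Chars.isIn ['f', 'o', 'r', 'e', 'a', 'r', 'm'] pl.toList <;> cases hf2 : PySem.Chars.isIn ['f', 'o', 'r', 'e', 'a', 'r', 'm'] cl.toList <;> simp
  | false =>
  cases ha2 : PySem.Chars.isIn ['a', 'r', 'm'] cl.toList with
  | true => cases hf1 : PySem.Chars.isIn ['f', 'o', 'r', 'e', 'a', 'r', 'm'] pl.toList <;> cases hf2 : PySem.Chars.isIn ['f', 'o', 'r', 'e', 'a', 'r', 'm'] cl.toList <;> simp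
  | false =>
  -- "arm" is absent from both names, so the "forearm" rule cannot fire either
  simp only [no_forearm ha1, no_forearm ha2, Bool.false_eq_true, Bool.or_self,
    or_false, if_false]
  cases hl1 : PySem.Chars.isIn ['l', 'e', 'g'] pl.toList with
  | true => cases hu1 : PySem.Chars.isIn ['u', 'p', 'l', 'e', 'g'] pl.toList <;> cases hu2 : PySem.Chars.isIn ['u', 'p', 'l', 'e', 'g'] cl.toList <;> simp
  | false =>
  cases hl2 : PySem.Chars.isIn ['l', 'e', 'g'] cl.toList with
  | true => cases hu1 : PySem.Chars.isIn ['u', 'p', 'l', 'e', 'g'] pl.toList <;> cases hu2 : PySem.Chars.isIn ['u', 'p', 'l', 'e', 'g'] cl.toList <;> simp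
  | false =>
  -- "leg" is absent from both names, so the "upleg" rule cannot fire either
  simp only [no_upleg hl1, no_upleg hl2, Bool.false_eq_true, Bool.or_self, or_false,
    if_false]
  cases hx0 : PySem.Chars.isIn ['h', 'a', 'n', 'd'] pl.toList <;>
  cases hx1 : PySem.Chars.isIn ['h', 'a', 'n', 'd'] cl.toList <;>
  cases hx2 : PySem.Chars.isIn ['f', 'i', 'n', 'g', 'e', 'r'] pl.toList <;>
  cases hx3 : PySem.Chars.isIn ['f', 'i', 'n', 'g', 'e', 'r'] cl.toList <;>
  cases hx4 : PySem.Chars.isIn ['t', 'h', 'u', 'm', 'b'] pl.toList <;>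
  cases hx5 : PySem.Chars.isIn ['t', 'h', 'u', 'm', 'b'] cl.toList <;>
  cases hx6 : PySem.Chars.isIn ['f', 'o', 'o', 't'] pl.toList <;>
  cases hx7 : PySem.Chars.isIn ['f', 'o', 'o', 't'] cl.toList <;>
  cases hx8 : PySem.Chars.isIn ['t', 'o', 'e'] pl.toList <;>
  cases hx9 : PySem.Chars.isIn ['t', 'o', 'e'] cl.toList <;>
    simp
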